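-- pv_equiv track=rewrite | github.com/TheAxiomFoundation/rac-compile | src/rac_compile/expression_ir.py | _rewrite_js_tokens
-- ===== SOURCE A (Python) =====
-- def _rewrite_js_tokens(expression: str) -> str:
--     """Rewrite JS-style tokens outside string literals."""
--     output: list[str] = []
--     index = 0
--     while index < len(expression):
--         char = expression[index]
--         if char in {"'", '"'}:
--             literal, index = _consume_string_literal(expression, index)
--             output.append(literal)
--             continue
--         if expression.startswith("!==", index):
--             output.append("!=")
--             index += 3
--             continue
--         if expression.startswith("===", index):
--             output.append("==")
--             index += 3
--             continue
--         if expression.startswith("&&", index):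
--             output.append(" and ")
--             index += 2
--             continue
--         if expression.startswith("||", index):
--             output.append(" or ")
--             index += 2
--             continue
--         if char == "!" and not expression.startswith("!=", index):
--             output.append(" not ")
--             index += 1
--             continue
--         if char.isalpha() or char == "_":
--             start = index
--             index += 1
--             while index < len(expression) and (
--                 expression[index].isalnum() or expression[index] == "_"
--             ):
--                 index += 1
--             identifier = expression[start:index]
--             if identifier == "true":
--                 output.append("True")
--             elif identifier == "false":
--                 output.append("False")
--             else:
--                 output.append(identifier)
--             continue
--         output.append(char)
--         index += 1
--     return "".join(output)
--
-- def _consume_string_literal(expression: str, start: int) -> tuple[str, int]: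
--     """Consume a quoted string literal, preserving escapes."""
--     quote = expression[start]
--     index = start + 1
--     while index < len(expression):
--         char = expression[index]
--         if char == "\\":
--             index += 2
--             continue
--         if char == quote:
--             index += 1
--             return expression[start:index], index
--         index += 1
--     return expression[start:], len(expression)
-- ===== SOURCE B (Python) =====
-- import re
--
-- _TOKEN = re.compile(
--     r"""(?P<str>'(?:\\[\s\S]|[^'])*'?|"(?:\\[\s\S]|[^"])*"?)"""  # string literal (escapes skipped, may be unterminated)
--     r"""|(?P<op>!==|===|&&|\|\||!(?!=))"""                        # operators to rewrite
--     r"""|(?P<id>[A-Za-z_][A-Za-z0-9_]*)"""                        # identifier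
--     r"""|(?P<ch>[\s\S])"""                                        # any other single character
-- )
--
-- _OPS = {"!==": "!=", "===": "==", "&&": " and ", "||": " or ", "!": " not "}
-- _KEYWORDS = {"true": "True", "false": "False"}
--
--
-- def _rewrite_js_tokens(expression: str) -> str:
--     """Rewrite JS-style tokens outside string literals."""
--
--     def repl(match: "re.Match[str]") -> str:
--         token = match.group(0)
--         if match.lastgroup == "op":
--             return _OPS[token]
--         if match.lastgroup == "id":
--             return _KEYWORDS.get(token, token)
--         return token
--
--     return _TOKEN.sub(repl, expression)
-- ===== Notes on version B (the rewrite author's own statement) =====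
-- stated objective: idiomatic
-- what changed: A's hand-written index-walking scanner (explicit while loop with startswith probes and manual index arithmetic) is replaced by a single compiled regex alternation (string literal | operators | identifier | catch-all char) applied with re.sub and a token->replacement callback.
import Mathlib
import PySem

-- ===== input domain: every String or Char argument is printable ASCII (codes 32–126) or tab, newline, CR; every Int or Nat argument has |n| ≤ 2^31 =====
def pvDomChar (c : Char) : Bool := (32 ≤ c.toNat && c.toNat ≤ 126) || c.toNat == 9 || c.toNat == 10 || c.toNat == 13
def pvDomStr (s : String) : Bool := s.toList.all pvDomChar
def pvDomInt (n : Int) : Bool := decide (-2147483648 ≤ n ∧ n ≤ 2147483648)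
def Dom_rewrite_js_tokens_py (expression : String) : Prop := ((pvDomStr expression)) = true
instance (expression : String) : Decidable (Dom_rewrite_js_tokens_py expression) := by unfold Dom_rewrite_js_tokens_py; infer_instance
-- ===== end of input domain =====

-- B replaces A's hand-rolled index-walking scanner by a regex-style tokenizer (ordered first-match
-- alternation consuming the remaining suffix, then a token -> replacement map); objective: idiomatic.


-- ===== PORT A =====
-- small decrease lemmas cited by the ports' termination proofs
theorem pv_declt (n i k : Nat) (h : i < n) : n - (i + k + 1) < n - i := by omega
theorem pv_declt2 (n i k : Nat) (h : i < n) : n + 2 - (i + k + 1) < n + 2 - i := by omega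

-- _consume_string_literal(expression, start): the scan loop is the recursion on index;
-- in-range nonnegative slices expression[a:b] / expression[a:] are (drop a).take (b-a) / drop a.
def consumeA (cs : List Char) (quote : Char) (start index : Nat) : List Char × Nat :=
  if h : index < cs.length then
    if cs[index] = '\\' then
      consumeA cs quote start (index + 2)
    else if cs[index] = quote then
      ((cs.drop start).take (index + 1 - start), index + 1)
    else
      consumeA cs quote start (index + 1)
  else
    (cs.drop start, cs.length)   -- unterminated: expression[start:], len(expression)
termination_by cs.length + 2 - index
decreasing_by
  · exact pv_declt2 cs.length index 1 h
  · exact pv_declt2 cs.length index 0 h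

-- the inner identifier while-loop of A (the short-circuit 'index < len and (...)' is the nested test)
def identEndA (cs : List Char) (index : Nat) : Nat :=
  if h : index < cs.length then
    if PySem.Chars.isalnum cs[index] || cs[index] == '_' then
      identEndA cs (index + 1)
    else index
  else index
termination_by cs.length - index
decreasing_by exact pv_declt cs.length index 0 h

theorem consumeA_snd_ge (cs : List Char) (quote : Char) (start index : Nat) :
    min index cs.length ≤ (consumeA cs quote start index).2 := by
  fun_induction consumeA <;> simp_all <;> omega

theorem identEndA_ge (cs : List Char) (index : Nat) : index ≤ identEndA cs index := by
  fun_induction identEndA <;> omega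

theorem pv_decq (cs : List Char) (q : Char) (index : Nat) (h : index < cs.length) :
    cs.length - (consumeA cs q index (index + 1)).2 < cs.length - index := by
  have := consumeA_snd_ge cs q index (index + 1); omega

theorem pv_deci (cs : List Char) (index : Nat) (h : index < cs.length) :
    cs.length - identEndA cs (index + 1) < cs.length - index := by
  have := identEndA_ge cs (index + 1); omega

-- the outer while-loop of A: the pieces appended to `output`, in order
def loopA (cs : List Char) (index : Nat) : List (List Char) :=
  if h : index < cs.length then
    if cs[index] = '\'' ∨ cs[index] = '"' then
      (consumeA cs cs[index] index (index + 1)).1 ::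
        loopA cs (consumeA cs cs[index] index (index + 1)).2
    else if PySem.Chars.startswith (cs.drop index) "!==".toList then
      "!=".toList :: loopA cs (index + 3)
    else if PySem.Chars.startswith (cs.drop index) "===".toList then
      "==".toList :: loopA cs (index + 3)
    else if PySem.Chars.startswith (cs.drop index) "&&".toList then
      " and ".toList :: loopA cs (index + 2)
    else if PySem.Chars.startswith (cs.drop index) "||".toList then
      " or ".toList :: loopA cs (index + 2)
    else if cs[index] = '!' ∧ ¬ PySem.Chars.startswith (cs.drop index) "!=".toList then
      " not ".toList :: loopA cs (index + 1)
    else if PySem.Chars.isalpha cs[index] || cs[index] == '_' then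
      (if (cs.drop index).take (identEndA cs (index + 1) - index) = "true".toList then "True".toList
       else if (cs.drop index).take (identEndA cs (index + 1) - index) = "false".toList then "False".toList
       else (cs.drop index).take (identEndA cs (index + 1) - index)) ::
        loopA cs (identEndA cs (index + 1))
    else
      [cs[index]] :: loopA cs (index + 1)
  else []
termination_by cs.length - index
decreasing_by
  · exact pv_decq cs cs[index] index h
  · exact pv_declt cs.length index 2 h
  · exact pv_declt cs.length index 2 h
  · exact pv_declt cs.length index 1 h
  · exact pv_declt cs.length index 1 h
  · exact pv_declt cs.length index 0 h
  · exact pv_deci cs index h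
  · exact pv_declt cs.length index 0 h

def rewrite_js_tokens_py (expression : String) : String :=
  String.ofList (loopA expression.toList 0).flatten   -- "".join(output)

-- ===== PORT B =====
theorem pv_decd (c : Char) (rest : List Char) : (rest.drop 1).length < (c :: rest).length := by
  simp only [List.length_drop, List.length_cons]; omega

theorem pv_decc (c : Char) (rest : List Char) : rest.length < (c :: rest).length := by
  simp only [List.length_cons]; omega

-- the string-literal sub-pattern (?:\\[\s\S]|[^q])*q?  matched greedily after the opening
-- quote q; the escape alternative \\[\s\S] takes the backslash plus the following char if any
def scanLitB (q : Char) : List Char → List Char × List Char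
  | [] => ([], [])
  | c :: rest =>
    if c = '\\' then
      ('\\' :: rest.take 1 ++ (scanLitB q (rest.drop 1)).1, (scanLitB q (rest.drop 1)).2)
    else if c = q then ([q], rest)
    else (c :: (scanLitB q rest).1, (scanLitB q rest).2)
termination_by cs => cs.length
decreasing_by all_goals first | exact pv_decd c rest | exact pv_decc c rest

def wordStartB (c : Char) : Bool :=  -- [A-Za-z_]
  ('A' ≤ c && c ≤ 'Z') || ('a' ≤ c && c ≤ 'z') || c == '_'

def wordCharB (c : Char) : Bool :=   -- [A-Za-z0-9_]
  wordStartB c || ('0' ≤ c && c ≤ '9')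

def identB (w : List Char) : List Char :=  -- keyword replacement for an id token
  if w = "true".toList then "True".toList
  else if w = "false".toList then "False".toList
  else w

-- one step of the master alternation at the head of the input:
-- (replacement text of the matched token, rest of the input)
def tokB : List Char → List Char × List Char
  | [] => ([], [])
  | c :: rest =>
    if c = '\'' ∨ c = '"' then (c :: (scanLitB c rest).1, (scanLitB c rest).2)
    else if c = '!' ∧ rest.take 2 = ['=', '='] then ("!=".toList, rest.drop 2)
    else if c = '=' ∧ rest.take 2 = ['=', '='] then ("==".toList, rest.drop 2)
    else if c = '&' ∧ rest.take 1 = ['&'] then (" and ".toList, rest.drop 1)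
    else if c = '|' ∧ rest.take 1 = ['|'] then (" or ".toList, rest.drop 1)
    else if c = '!' ∧ rest.take 1 ≠ ['='] then (" not ".toList, rest)   -- !(?!=)
    else if wordStartB c then (identB (c :: rest.takeWhile wordCharB), rest.dropWhile wordCharB)
    else ([c], rest)                                                    -- catch-all single char

theorem scanLitB_rest_suffix : ∀ (q : Char) (cs : List Char), (scanLitB q cs).2 <:+ cs
  | q, [] => by simp [scanLitB]
  | q, c :: rest => by
      by_cases hb : c = '\\'
      · have he : (scanLitB q (c :: rest)).2 = (scanLitB q (rest.drop 1)).2 := by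
          simp only [scanLitB]; rw [if_pos hb]
        rw [he]
        exact ((scanLitB_rest_suffix q (rest.drop 1)).trans
          (List.drop_suffix 1 rest)).trans (List.suffix_cons c rest)
      · by_cases hq : c = q
        · have he : (scanLitB q (c :: rest)).2 = rest := by
            simp only [scanLitB]; rw [if_neg hb, if_pos hq]
          rw [he]; exact List.suffix_cons c rest
        · have he : (scanLitB q (c :: rest)).2 = (scanLitB q rest).2 := by
            simp only [scanLitB]; rw [if_neg hb, if_neg hq]
          rw [he]
          exact (scanLitB_rest_suffix q rest).trans (List.suffix_cons c rest)
termination_by _ cs => cs.length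
decreasing_by all_goals (simp only [List.length_cons, List.length_drop]; omega)

theorem scanLitB_rest_le (q : Char) (cs : List Char) : (scanLitB q cs).2.length ≤ cs.length :=
  (scanLitB_rest_suffix q cs).length_le

theorem tokB_rest_lt (c : Char) (cs : List Char) :
    (tokB (c :: cs)).2.length < (c :: cs).length := by
  have hd := List.length_dropWhile_le (p := wordCharB) (l := cs)
  have h1 := scanLitB_rest_le c cs
  simp only [tokB]
  split_ifs <;> simp_all <;> omega

-- iterate the tokenizer over the input, concatenating the replacements
def goB (cs : List Char) : List Char :=
  match cs with
  | [] => []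
  | c :: rest => (tokB (c :: rest)).1 ++ goB (tokB (c :: rest)).2
termination_by cs.length
decreasing_by exact tokB_rest_lt c rest

def rewrite_js_tokens_py_alt (expression : String) : String :=
  String.ofList (goB expression.toList)

-- ===== PRECONDITION & SPEC =====
def Spec_rewrite_js_tokens_py (expression : String) (out : String) : Prop := out = rewrite_js_tokens_py_alt expression
instance (expression : String) (out : String) : Decidable (Spec_rewrite_js_tokens_py expression out) := by unfold Spec_rewrite_js_tokens_py; infer_instance

-- ===== CLAIM (what is proved, stated in full; the proofs are below) =====
def Claim_equal_rewrite_js_tokens_py : Prop := ∀ (expression : String), Dom_rewrite_js_tokens_py expression → Spec_rewrite_js_tokens_py expression (rewrite_js_tokens_py expression)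

-- ===== LEMMAS AND PROOFS =====

theorem pv_take_split (cs : List Char) (start index k : Nat) (h : start ≤ index) :
    (cs.drop start).take (index + k - start) =
      (cs.drop start).take (index - start) ++ (cs.drop index).take k := by
  rw [show index + k - start = (index - start) + k by omega, List.take_add, List.drop_drop,
    show start + (index - start) = index from by omega]

theorem pv_drop_cons (cs : List Char) (index : Nat) (h : index < cs.length) :
    cs.drop index = cs[index] :: cs.drop (index + 1) :=
  List.drop_eq_getElem_cons h

theorem pv_suffix_drop {l cs : List Char} (h : l <:+ cs) :
    cs.drop (cs.length - l.length) = l := by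
  obtain ⟨t, rfl⟩ := h
  simp

-- consumeA, seen from the suffix: it returns the slice up to where the literal
-- sub-pattern of B stops, and the index pointing at B's rest.
theorem consumeA_eq :
    ∀ n cs q start index, cs.length - index ≤ n → start ≤ index →
      consumeA cs q start index =
        ((cs.drop start).take (index - start) ++ (scanLitB q (cs.drop index)).1,
         cs.length - (scanLitB q (cs.drop index)).2.length) := by
  intro n
  induction n with
  | zero =>
      intro cs q start index hn hs
      rw [consumeA, dif_neg (by omega : ¬ index < cs.length)]
      rw [show cs.drop index = ([] : List Char) from List.drop_of_length_le (by omega)]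
      rw [List.take_of_length_le (by simp; omega)]
      simp [scanLitB]
  | succ n ih =>
      intro cs q start index hn hs
      by_cases h : index < cs.length
      case neg =>
        rw [consumeA, dif_neg h]
        rw [show cs.drop index = ([] : List Char) from List.drop_of_length_le (by omega)]
        rw [List.take_of_length_le (by simp; omega)]
        simp [scanLitB]
      rw [consumeA, dif_pos h]
      have hcons : cs.drop index = cs[index] :: cs.drop (index + 1) := pv_drop_cons cs index h
      by_cases hb : cs[index] = '\\'
      · -- the escape alternative: both consume the backslash and the char after it (if any)
        have hscan : scanLitB q (cs.drop index) =
            ('\\' :: (cs.drop (index + 1)).take 1 ++ (scanLitB q (cs.drop (index + 2))).1,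
             (scanLitB q (cs.drop (index + 2))).2) := by
          rw [hcons]
          simp only [scanLitB]
          rw [if_pos hb, List.drop_drop, show index + 1 + 1 = index + 2 from by omega]
        rw [if_pos hb, ih cs q start (index + 2) (by omega) (by omega), hscan]
        simp only [Prod.mk.injEq, and_true]
        rw [pv_take_split cs start index 2 hs, hcons, hb]
        simp
      · by_cases hq : cs[index] = q
        · -- closing quote found
          have hscan : scanLitB q (cs.drop index) = ([q], cs.drop (index + 1)) := by
            rw [hcons]
            simp only [scanLitB]
            rw [if_neg hb, if_pos hq]
          rw [if_neg hb, if_pos hq, hscan]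
          simp only [Prod.mk.injEq]
          constructor
          · rw [pv_take_split cs start index 1 hs, hcons, hq]
            simp
          · rw [show (cs.drop (index + 1)).length = cs.length - (index + 1) from by simp]
            omega
        · -- ordinary character inside the literal
          have hscan : scanLitB q (cs.drop index) =
              (cs[index] :: (scanLitB q (cs.drop (index + 1))).1,
               (scanLitB q (cs.drop (index + 1))).2) := by
            rw [hcons]
            simp only [scanLitB]
            rw [if_neg hb, if_neg hq]
          rw [if_neg hb, if_neg hq, ih cs q start (index + 1) (by omega) (by omega), hscan]
          simp only [Prod.mk.injEq, and_true]
          rw [pv_take_split cs start index 1 hs]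
          have ht : (cs.drop index).take 1 = [cs[index]] := by rw [hcons]; rfl
          rw [ht]
          simp

theorem pv_prefix2 (a b : Char) (r : List Char) : [a, b] <+: r ↔ r.take 2 = [a, b] := by
  match r with
  | [] => simp
  | [x] => simp
  | x :: y :: t => simp [List.cons_prefix_cons, eq_comm]

theorem pv_prefix1 (a : Char) (r : List Char) : [a] <+: r ↔ r.take 1 = [a] := by
  match r with
  | [] => simp
  | x :: t => simp [List.cons_prefix_cons, eq_comm]

theorem pv_wordStart (c : Char) :
    (PySem.Chars.isalpha c || c == '_') = wordStartB c := by
  simp [PySem.Chars.isalpha, PySem.Chars.isupper, PySem.Chars.islower, wordStartB]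

theorem pv_wordChar :
    (fun c => PySem.Chars.isalnum c || c == '_') = wordCharB := by
  funext c
  simp only [PySem.Chars.isalnum, PySem.Chars.isalpha, PySem.Chars.isupper, PySem.Chars.islower,
    PySem.Chars.isdigit, wordCharB, wordStartB, Bool.or_assoc, Bool.or_comm, Bool.or_left_comm]

theorem pv_identEndA (cs : List Char) :
    ∀ n index, cs.length - index ≤ n →
      identEndA cs index = index + ((cs.drop index).takeWhile wordCharB).length := by
  intro n
  induction n with
  | zero =>
      intro index hn
      rw [identEndA, dif_neg (by omega : ¬ index < cs.length),
        List.drop_of_length_le (by omega)]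
      simp
  | succ n ih =>
      intro index hn
      rw [identEndA]
      by_cases h : index < cs.length
      · rw [dif_pos h]
        by_cases hw : wordCharB cs[index] = true
        · have hw' : (PySem.Chars.isalnum cs[index] || cs[index] == '_') = true := by
            rw [congrFun pv_wordChar cs[index]]; exact hw
          rw [if_pos hw', ih (index + 1) (by omega)]
          have htw : (cs.drop index).takeWhile wordCharB
              = cs[index] :: (cs.drop (index + 1)).takeWhile wordCharB := by
            rw [pv_drop_cons cs index h, List.takeWhile_cons, if_pos hw]
          rw [htw]
          simp only [List.length_cons]
          omega
        · have hw' : ¬ (PySem.Chars.isalnum cs[index] || cs[index] == '_') = true := by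
            rw [congrFun pv_wordChar cs[index]]; exact hw
          rw [if_neg hw']
          have htw : (cs.drop index).takeWhile wordCharB = [] := by
            rw [pv_drop_cons cs index h, List.takeWhile_cons, if_neg hw]
          rw [htw]
          simp
      · rw [dif_neg h, List.drop_of_length_le (by omega)]
        simp

theorem pv_take_takeWhile (p : Char → Bool) (l : List Char) :
    l.take (l.takeWhile p).length = l.takeWhile p := by
  induction l with
  | nil => simp
  | cons x t ih =>
      by_cases h : p x <;> simp [List.takeWhile_cons, h, ih]

theorem pv_drop_dropWhile (p : Char → Bool) (l : List Char) :
    l.drop (l.takeWhile p).length = l.dropWhile p := by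
  induction l with
  | nil => simp
  | cons x t ih =>
      by_cases h : p x <;> simp [List.takeWhile_cons, List.dropWhile_cons, h, ih]

theorem loopA_eq_goB :
    ∀ n cs index, cs.length - index ≤ n →
      (loopA cs index).flatten = goB (cs.drop index) := by
  intro n
  induction n with
  | zero =>
      intro cs index hn
      rw [loopA]
      have hge : ¬ index < cs.length := by omega
      rw [dif_neg hge, List.drop_of_length_le (by omega)]
      simp [goB]
  | succ n ih =>
      intro cs index hn
      by_cases h : index < cs.length
      case neg =>
        rw [loopA, dif_neg h, List.drop_of_length_le (by omega)]
        simp [goB]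
      rw [loopA, dif_pos h]
      have hdrop : cs.drop index = cs[index] :: cs.drop (index + 1) := pv_drop_cons cs index h
      set c := cs[index] with hc
      set r := cs.drop (index + 1) with hr
      have hrlen : r.length = cs.length - (index + 1) := by simp [hr]
      have hgo : goB (cs.drop index) = (tokB (c :: r)).1 ++ goB (tokB (c :: r)).2 := by
        rw [hdrop]; rw [goB]
      -- the eight alternatives, in order
      by_cases b1 : c = '\'' ∨ c = '"'
      · rw [if_pos b1, hgo]
        rw [consumeA_eq (cs.length - (index + 1)) cs c index (index + 1) (by omega) (by omega)]
        have h1 : (cs.drop index).take (index + 1 - index) = [c] := by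
          rw [hdrop]; simp
        simp only [tokB, if_pos b1, ← hr, h1]
        have hsfx : (scanLitB c r).2 <:+ cs := (scanLitB_rest_suffix c r).trans (hr ▸ List.drop_suffix (index + 1) cs)
        have hlen : (scanLitB c r).2.length ≤ r.length := scanLitB_rest_le c r
        simp only [List.flatten_cons]; rw [ih cs (cs.length - (scanLitB c r).2.length) (by omega)]
        rw [pv_suffix_drop hsfx]
        simp
      rw [if_neg b1]
      have hsw : ∀ p : List Char, PySem.Chars.startswith (cs.drop index) p = true ↔ p <+: c :: r := by
        intro p; rw [← hdrop]; exact PySem.Chars.startswith_iff (cs.drop index) p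
      by_cases b2 : c = '!' ∧ r.take 2 = ['=', '=']
      · have hb : PySem.Chars.startswith (cs.drop index) "!==".toList = true := by
          rw [hsw]
          show ['!', '=', '='] <+: c :: r
          rw [List.cons_prefix_cons]
          exact ⟨b2.1.symm, (pv_prefix2 '=' '=' r).2 b2.2⟩
        rw [if_pos hb, hgo]
        simp only [tokB, if_neg b1, if_pos b2]
        simp only [List.flatten_cons]; rw [ih cs (index + 3) (by omega)]
        have : cs.drop (index + 3) = r.drop 2 := by
          rw [hr, List.drop_drop]
        rw [this]
      · have hb : ¬ PySem.Chars.startswith (cs.drop index) "!==".toList = true := by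
          rw [hsw]
          show ¬ ['!', '=', '='] <+: c :: r
          rw [List.cons_prefix_cons]
          rintro ⟨h1, h2⟩
          exact b2 ⟨h1.symm, (pv_prefix2 '=' '=' r).1 h2⟩
        rw [if_neg hb]
        by_cases b3 : c = '=' ∧ r.take 2 = ['=', '=']
        · have hb3 : PySem.Chars.startswith (cs.drop index) "===".toList = true := by
            rw [hsw]
            show ['=', '=', '='] <+: c :: r
            rw [List.cons_prefix_cons]
            exact ⟨b3.1.symm, (pv_prefix2 '=' '=' r).2 b3.2⟩
          rw [if_pos hb3, hgo]
          simp only [tokB, if_neg b1, if_neg b2, if_pos b3]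
          simp only [List.flatten_cons]; rw [ih cs (index + 3) (by omega)]
          have : cs.drop (index + 3) = r.drop 2 := by
            rw [hr, List.drop_drop]
          rw [this]
        · have hb3 : ¬ PySem.Chars.startswith (cs.drop index) "===".toList = true := by
            rw [hsw]
            show ¬ ['=', '=', '='] <+: c :: r
            rw [List.cons_prefix_cons]
            rintro ⟨h1, h2⟩
            exact b3 ⟨h1.symm, (pv_prefix2 '=' '=' r).1 h2⟩
          rw [if_neg hb3]
          by_cases b4 : c = '&' ∧ r.take 1 = ['&']
          · have hb4 : PySem.Chars.startswith (cs.drop index) "&&".toList = true := by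
              rw [hsw]
              show ['&', '&'] <+: c :: r
              rw [List.cons_prefix_cons]
              exact ⟨b4.1.symm, (pv_prefix1 '&' r).2 b4.2⟩
            rw [if_pos hb4, hgo]
            simp only [tokB, if_neg b1, if_neg b2, if_neg b3, if_pos b4]
            simp only [List.flatten_cons]; rw [ih cs (index + 2) (by omega)]
            have : cs.drop (index + 2) = r.drop 1 := by
              rw [hr, List.drop_drop]
            rw [this]
          · have hb4 : ¬ PySem.Chars.startswith (cs.drop index) "&&".toList = true := by
              rw [hsw]
              show ¬ ['&', '&'] <+: c :: r
              rw [List.cons_prefix_cons]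
              rintro ⟨h1, h2⟩
              exact b4 ⟨h1.symm, (pv_prefix1 '&' r).1 h2⟩
            rw [if_neg hb4]
            by_cases b5 : c = '|' ∧ r.take 1 = ['|']
            · have hb5 : PySem.Chars.startswith (cs.drop index) "||".toList = true := by
                rw [hsw]
                show ['|', '|'] <+: c :: r
                rw [List.cons_prefix_cons]
                exact ⟨b5.1.symm, (pv_prefix1 '|' r).2 b5.2⟩
              rw [if_pos hb5, hgo]
              simp only [tokB, if_neg b1, if_neg b2, if_neg b3, if_neg b4, if_pos b5]
              simp only [List.flatten_cons]; rw [ih cs (index + 2) (by omega)]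
              have : cs.drop (index + 2) = r.drop 1 := by
                rw [hr, List.drop_drop]
              rw [this]
            · have hb5 : ¬ PySem.Chars.startswith (cs.drop index) "||".toList = true := by
                rw [hsw]
                show ¬ ['|', '|'] <+: c :: r
                rw [List.cons_prefix_cons]
                rintro ⟨h1, h2⟩
                exact b5 ⟨h1.symm, (pv_prefix1 '|' r).1 h2⟩
              rw [if_neg hb5]
              by_cases b6 : c = '!' ∧ r.take 1 ≠ ['=']
              · have hb6 : c = '!' ∧ ¬ PySem.Chars.startswith (cs.drop index) "!=".toList = true := by
                  refine ⟨b6.1, ?_⟩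
                  rw [hsw]
                  show ¬ ['!', '='] <+: c :: r
                  rw [List.cons_prefix_cons]
                  rintro ⟨-, h2⟩
                  exact b6.2 ((pv_prefix1 '=' r).1 h2)
                rw [if_pos hb6, hgo]
                simp only [tokB, if_neg b1, if_neg b2, if_neg b3, if_neg b4, if_neg b5, if_pos b6]
                simp only [List.flatten_cons]; rw [ih cs (index + 1) (by omega), hr]
              · have hb6 : ¬ (c = '!' ∧ ¬ PySem.Chars.startswith (cs.drop index) "!=".toList = true) := by
                  rintro ⟨h1, h2⟩
                  apply b6
                  refine ⟨h1, fun hk => h2 ?_⟩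
                  rw [hsw]
                  show ['!', '='] <+: c :: r
                  rw [List.cons_prefix_cons]
                  exact ⟨h1.symm, (pv_prefix1 '=' r).2 hk⟩
                rw [if_neg hb6]
                by_cases b7 : wordStartB c = true
                · have hb7 : (PySem.Chars.isalpha c || c == '_') = true := by
                    rw [pv_wordStart]; exact b7
                  rw [if_pos hb7, hgo]
                  simp only [tokB, if_neg b1, if_neg b2, if_neg b3, if_neg b4, if_neg b5,
                    if_neg b6, if_pos b7]
                  have hstop : identEndA cs (index + 1) = (index + 1) + (r.takeWhile wordCharB).length := by
                    rw [pv_identEndA cs (cs.length - (index + 1)) (index + 1) (by omega), hr]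
                  have hid : (cs.drop index).take (identEndA cs (index + 1) - index) =
                      c :: r.takeWhile wordCharB := by
                    rw [hdrop, hstop]
                    rw [show index + 1 + (r.takeWhile wordCharB).length - index =
                        (r.takeWhile wordCharB).length + 1 by omega]
                    simp [pv_take_takeWhile]
                  rw [hid]
                  have hrest : cs.drop (identEndA cs (index + 1)) = r.dropWhile wordCharB := by
                    rw [hstop,
                      show r.dropWhile wordCharB = r.drop (r.takeWhile wordCharB).length from
                        (pv_drop_dropWhile _ _).symm,
                      hr, List.drop_drop]
                  simp only [List.flatten_cons]; rw [ih cs (identEndA cs (index + 1)) (by have := identEndA_ge cs (index + 1); omega)]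
                  rw [hrest]
                  simp [identB]
                · have hb7 : ¬ (PySem.Chars.isalpha c || c == '_') = true := by
                    rw [pv_wordStart]; simp [b7]
                  rw [if_neg hb7, hgo]
                  simp only [tokB, if_neg b1, if_neg b2, if_neg b3, if_neg b4, if_neg b5,
                    if_neg b6, if_neg b7]
                  simp only [List.flatten_cons]; rw [ih cs (index + 1) (by omega), hr]

-- ===== VERDICT (by name: the statement is the Claim_ definition above) =====
theorem rewrite_js_tokens_py_spec : Claim_equal_rewrite_js_tokens_py := by
  intro e _
  unfold Spec_rewrite_js_tokens_py rewrite_js_tokens_py rewrite_js_tokens_py_alt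
  rw [loopA_eq_goB e.toList.length e.toList 0 (by omega), List.drop_zero]
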